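-- pv_equiv track=rewrite | github.com/pranavprem/neo-services | pipeline/briefer.py | _format_trending
-- ===== SOURCE A (Python) =====
-- def _format_trending(topics: list[dict]) -> str:
--     if not topics:
--         return ""
--     lines = ["Currently trending topics (use 1-2 if they inspire good concepts):"]
--     by_source: dict[str, list[str]] = {}
--     for t in topics:
--         by_source.setdefault(t.get("source", "other"), []).append(t["topic"])
--     for source, names in by_source.items():
--         lines.append(f"- {source.title()}: {', '.join(names[:5])}")
--     return "\n".join(lines)
-- ===== SOURCE B (Python) =====
-- def _format_trending(topics: list[dict]) -> str:
--     if not topics: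
--         return ""
--     sources = list(dict.fromkeys(t.get("source", "other") for t in topics))
--     lines = ["Currently trending topics (use 1-2 if they inspire good concepts):"]
--     for source in sources:
--         names = [t["topic"] for t in topics if t.get("source", "other") == source][:5]
--         lines.append(f"- {source.title()}: {', '.join(names)}")
--     return "\n".join(lines)
-- ===== Notes on version B (the rewrite author's own statement) =====
-- stated objective: alternative
-- what changed: Replaces A's one-pass dict-of-lists grouping (setdefault/append) with an ordered distinct-source extraction via dict.fromkeys followed by a per-source filtering comprehension.
import Mathlib
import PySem

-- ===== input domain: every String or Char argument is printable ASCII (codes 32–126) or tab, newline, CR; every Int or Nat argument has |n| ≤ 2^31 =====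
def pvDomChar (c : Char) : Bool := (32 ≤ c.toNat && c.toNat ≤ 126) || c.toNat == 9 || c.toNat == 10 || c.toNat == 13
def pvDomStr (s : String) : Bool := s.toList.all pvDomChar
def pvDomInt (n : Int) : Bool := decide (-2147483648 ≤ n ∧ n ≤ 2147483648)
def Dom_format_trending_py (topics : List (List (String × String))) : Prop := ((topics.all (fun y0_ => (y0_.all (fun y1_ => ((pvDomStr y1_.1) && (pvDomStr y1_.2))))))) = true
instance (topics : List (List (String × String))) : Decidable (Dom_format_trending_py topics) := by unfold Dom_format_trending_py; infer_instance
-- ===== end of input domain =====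

-- B replaces A's one-pass dict grouping by ordered distinct-source extraction plus per-source
-- filtering passes (objective: alternative, not faster).

-- shared helpers: Python's dict.get(k, dflt) on an association list (first match), and str.title()
-- (exact on the ASCII domain, where Python's "cased" characters are exactly the alphabetic ones)
def dget (t : List (String × String)) (k dflt : String) : String :=
  match t.find? (fun p => p.1 == k) with
  | some p => p.2
  | none => dflt

def titleAux : List Char → Bool → List Char
  | [], _ => []
  | c :: cs, prevAlpha =>
      (if PySem.Chars.isalpha c then
        (if prevAlpha then PySem.Chars.lowerChar c else PySem.Chars.upperChar c)
       else c) :: titleAux cs (PySem.Chars.isalpha c)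

def pyTitle (s : String) : String := String.ofList (titleAux s.toList false)

-- ===== PORT A =====
def format_trending_py (topics : List (List (String × String))) : String :=
  if topics = [] then "" else
    let header := "Currently trending topics (use 1-2 if they inspire good concepts):"
    -- by_source.setdefault(t.get("source","other"), []).append(t["topic"]) = modify key [] (· ++ [name])
    -- (t["topic"] raises KeyError when absent: Pre_ excludes that; the port defaults to "")
    let bySource : PySem.Dict String (List String) :=
      topics.foldl (fun d t => d.modify (dget t "source" "other") [] (· ++ [dget t "topic" ""])) PySem.Dict.empty
    let lines := header :: bySource.items.map (fun p =>
      "- " ++ pyTitle p.1 ++ ": " ++ PySem.Str.join ", " (p.2.take 5))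
    PySem.Str.join "\n" lines

-- ===== PORT B =====
def format_trending_py_alt (topics : List (List (String × String))) : String :=
  if topics = [] then "" else
    let sources := PySem.List.dedup (topics.map (fun t => dget t "source" "other"))
    let header := "Currently trending topics (use 1-2 if they inspire good concepts):"
    let lines := header :: sources.map (fun s =>
      "- " ++ pyTitle s ++ ": " ++ PySem.Str.join ", "
        (((topics.filter (fun t => dget t "source" "other" == s)).map (fun t => dget t "topic" "")).take 5))
    PySem.Str.join "\n" lines

-- ===== PRECONDITION & SPEC =====
-- Pre_ excludes exactly the topic lists with a dict missing the "topic" key, where the Python A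
-- (and B alike) raises KeyError.
def Pre_format_trending_py (topics : List (List (String × String))) : Prop :=
  topics.all (fun t => (t.find? (fun p => p.1 == "topic")).isSome) = true
instance (topics : List (List (String × String))) : Decidable (Pre_format_trending_py topics) := by
  unfold Pre_format_trending_py; infer_instance

def pvWitness_format_trending_py : (List (List (String × String))) :=
  [[("topic", "ai"), ("source", "hn")], [("topic", "rust")]]

def Spec_format_trending_py (topics : List (List (String × String))) (out : String) : Prop := out = format_trending_py_alt topics
instance (topics : List (List (String × String))) (out : String) : Decidable (Spec_format_trending_py topics out) := by unfold Spec_format_trending_py; infer_instance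

-- ===== CLAIM (what is proved, stated in full; the proofs are below) =====
def Claim_equal_format_trending_py : Prop := ∀ (topics : List (List (String × String))), Dom_format_trending_py topics → Pre_format_trending_py topics → Spec_format_trending_py topics (format_trending_py topics)

-- ===== LEMMAS AND PROOFS =====

-- with Nodup keys, the items list is the keys list paired with each key's value
theorem items_eq_keys_map {ν : Type} (d : PySem.Dict String ν) (v0 : ν) (h : d.keys.Nodup) :
    d.items = d.keys.map (fun k => (k, d.getD k v0)) := by
  have h2 : d.items.map (fun p => (p.1, d.getD p.1 v0)) = d.items.map id :=
    List.map_congr_left (fun p hp => by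
      have := PySem.Dict.getD_of_mem_items (d := d) (k := p.1) (v := p.2) (d0 := v0)
        (by simpa using hp) h
      cases p; simp_all)
  simp only [PySem.Dict.keys, List.map_map]
  rw [show ((fun k => (k, d.getD k v0)) ∘ (fun p : String × ν => p.1)) =
      (fun p : String × ν => (p.1, d.getD p.1 v0)) from rfl, h2, List.map_id]

-- characterisation of A's grouping loop: its items are the first-seen distinct keys, each
-- paired with the values of the matching elements in order
theorem group_items (topics : List (List (String × String)))
    (g n : List (String × String) → String) :
    (topics.foldl (fun d t => d.modify (g t) [] (· ++ [n t])) PySem.Dict.empty).items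
      = (PySem.List.dedup (topics.map g)).map
          (fun s => (s, (topics.filter (fun t => g t == s)).map n)) := by
  set D : PySem.Dict String (List String) :=
    topics.foldl (fun d t => d.modify (g t) [] (· ++ [n t])) PySem.Dict.empty with hD
  have hkeys : D.keys = PySem.List.dedup (topics.map g) := by
    rw [hD, PySem.Dict.keys_foldl_modify_key]
    rfl
  have hnodup : D.keys.Nodup := by
    rw [hkeys]; exact PySem.List.nodup_dedup _
  have hgetD : ∀ s, D.getD s [] = (topics.filter (fun t => g t == s)).map n := by
    intro s
    have hfold : D = (topics.map (fun t => (g t, n t))).foldl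
        (fun d p => d.modify p.1 [] (· ++ [p.2])) PySem.Dict.empty := by
      rw [hD, List.foldl_map]
    rw [hfold, PySem.Dict.getD_foldl_modify_append]
    simp [List.filter_map, List.map_map, Function.comp_def]
  rw [items_eq_keys_map D [] hnodup, hkeys]
  exact List.map_congr_left (fun s _ => by rw [hgetD])

theorem format_trending_py_equal (topics : List (List (String × String))) :
    format_trending_py topics = format_trending_py_alt topics := by
  unfold format_trending_py format_trending_py_alt
  by_cases he : topics = []
  · simp [he]
  · simp only [if_neg he]
    rw [group_items topics (fun t => dget t "source" "other") (fun t => dget t "topic" ""),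
      List.map_map]
    rfl

-- ===== VERDICT (by name: the statement is the Claim_ definition above) =====
theorem format_trending_py_spec : Claim_equal_format_trending_py := by
  intro topics _ _
  unfold Spec_format_trending_py
  exact format_trending_py_equal topics
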